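-- pv_equiv track=rewrite | github.com/JonMoll/Proyecto2 | final/train_aoa.py | ProbabilitiesToInt
-- ===== SOURCE A (Python) =====
-- def ProbabilitiesToInt(vector_probabilities):
--     max_probability = vector_probabilities[0]
--     max_index = 0
--
--     for i in range(len(vector_probabilities)):
--         if vector_probabilities[i] > max_probability:
--             max_probability = vector_probabilities[i]
--             max_index = i
--
--     return max_index
-- ===== SOURCE B (Python) =====
-- def ProbabilitiesToInt(vector_probabilities):
--     return vector_probabilities.index(max(vector_probabilities))
-- ===== Notes on version B (the rewrite author's own statement) =====
-- stated objective: idiomatic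
-- what changed: Replaces the fused single-pass scan carrying (max, index) with the idiomatic two-step max-then-first-index lookup, which agrees with A's strict-'>' first-occurrence semantics.
import Mathlib
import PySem

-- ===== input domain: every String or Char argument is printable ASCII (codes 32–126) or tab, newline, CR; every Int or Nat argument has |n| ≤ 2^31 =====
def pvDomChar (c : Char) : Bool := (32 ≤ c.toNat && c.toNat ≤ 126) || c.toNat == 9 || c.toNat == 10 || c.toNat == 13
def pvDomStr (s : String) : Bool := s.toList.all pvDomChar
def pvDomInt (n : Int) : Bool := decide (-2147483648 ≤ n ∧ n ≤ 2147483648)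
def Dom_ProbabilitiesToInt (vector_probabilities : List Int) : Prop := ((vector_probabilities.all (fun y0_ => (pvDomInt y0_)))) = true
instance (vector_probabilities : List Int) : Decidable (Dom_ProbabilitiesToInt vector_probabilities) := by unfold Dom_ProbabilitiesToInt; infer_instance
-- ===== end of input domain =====

-- B replaces A's fused single-pass (max, index) scan with the idiomatic max-then-first-index lookup; same O(n) cost.


-- ===== PORT A =====
-- literal port: max_probability = v[0] (IndexError on [], excluded by Pre_);
-- for i in range(len(v)): if v[i] > max_probability: update both; return max_index
def ProbabilitiesToInt (vector_probabilities : List Int) : Int :=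
  match vector_probabilities with
  | [] => 0  -- v[0] raises IndexError; excluded by Pre_
  | h :: _ =>
    let st := (PySem.List.pyRange 0 (PySem.List.len vector_probabilities) 1).foldl
      (fun (st : Int × Int) i =>
        if PySem.List.pyGetD vector_probabilities i 0 > st.1 then
          (PySem.List.pyGetD vector_probabilities i 0, i)
        else st)
      (h, 0)
    st.2

-- ===== PORT B =====
-- return vector_probabilities.index(max(vector_probabilities))
def ProbabilitiesToInt_alt (vector_probabilities : List Int) : Int :=
  match PySem.List.max? vector_probabilities (fun x => x) with
  | none => 0  -- max([]) raises ValueError; excluded by Pre_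
  | some m => ((PySem.List.index? vector_probabilities m).getD 0 : Nat)

-- ===== PRECONDITION & SPEC =====
-- Pre_ excludes the empty list, on which A raises IndexError (and B raises ValueError).
def Pre_ProbabilitiesToInt (vector_probabilities : List Int) : Prop := vector_probabilities ≠ []
instance (vector_probabilities : List Int) : Decidable (Pre_ProbabilitiesToInt vector_probabilities) := by unfold Pre_ProbabilitiesToInt; infer_instance
def pvWitness_ProbabilitiesToInt : List Int := [1, 3, 2, 3]

def Spec_ProbabilitiesToInt (vector_probabilities : List Int) (out : Int) : Prop := out = ProbabilitiesToInt_alt vector_probabilities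
instance (vector_probabilities : List Int) (out : Int) : Decidable (Spec_ProbabilitiesToInt vector_probabilities out) := by unfold Spec_ProbabilitiesToInt; infer_instance

-- ===== CLAIM (what is proved, stated in full; the proofs are below) =====
def Claim_equal_ProbabilitiesToInt : Prop := ∀ (vector_probabilities : List Int), Dom_ProbabilitiesToInt vector_probabilities → Pre_ProbabilitiesToInt vector_probabilities → Spec_ProbabilitiesToInt vector_probabilities (ProbabilitiesToInt vector_probabilities)

-- ===== LEMMAS AND PROOFS =====

-- The scan over the enumerated tail: final max is foldl max, final index is the
-- first occurrence of the overall max when it exceeds the seed, else the seed index.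
theorem pvScan_spec (t : List Int) (s m i : Int) :
    (PySem.List.enumerate t s).foldl
      (fun (st : Int × Int) p => if p.2 > st.1 then (p.2, p.1) else st) (m, i)
    = (t.foldl max m,
       if m < t.foldl max m then s + (t.idxOf (t.foldl max m) : Int) else i) := by
  induction t generalizing s m i with
  | nil => simp
  | cons x t ih =>
    rw [PySem.List.enumerate_cons]
    simp only [List.foldl_cons, List.foldl_cons]
    by_cases hx : x > m
    · simp only [if_pos hx, ih]
      have hxle : x ≤ t.foldl max x := (PySem.List.le_foldl_max t x).1
      have hmax : max m x = x := by omega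
      rw [hmax]
      by_cases hlt : x < t.foldl max x
      · have hne : x ≠ t.foldl max x := by omega
        rw [if_pos hlt, if_pos (by omega), List.idxOf_cons_ne _ (by exact_mod_cast hne)]
        simp only [Prod.mk.injEq, Nat.succ_eq_add_one, true_and]
        push_cast; ring
      · have heq : t.foldl max x = x := by omega
        rw [if_neg hlt, heq, if_pos hx, List.idxOf_cons_self]
        simp
    · simp only [if_neg hx, ih]
      have hmax : max m x = m := by omega
      rw [hmax]
      by_cases hlt : m < t.foldl max m
      · have hne : x ≠ t.foldl max m := by omega
        rw [if_pos hlt, if_pos hlt, List.idxOf_cons_ne _ (by exact_mod_cast hne)]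
        simp only [Prod.mk.injEq, Nat.succ_eq_add_one, true_and]
        push_cast; ring
      · rw [if_neg hlt, if_neg hlt]

-- idxOf? returns some (idxOf) on members
theorem pvIdxOf?_of_mem {v : Int} {t : List Int} (h : v ∈ t) :
    t.idxOf? v = some (t.idxOf v) := by
  induction t with
  | nil => cases h
  | cons x t ih =>
    by_cases hx : x = v
    · subst hx; simp [List.idxOf?_cons, List.idxOf_cons_self]
    · have hv : v ∈ t := by
        rcases List.mem_cons.mp h with h1 | h1
        · exact absurd h1.symm hx
        · exact h1
      simp [List.idxOf?_cons, hx, ih hv]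

-- ===== VERDICT (by name: the statement is the Claim_ definition above) =====
theorem ProbabilitiesToInt_spec : Claim_equal_ProbabilitiesToInt := by
  intro v _ hpre
  unfold Spec_ProbabilitiesToInt
  cases v with
  | nil => exact absurd rfl hpre
  | cons h t =>
    unfold ProbabilitiesToInt ProbabilitiesToInt_alt
    rw [PySem.List.max?_id_cons]
    simp only
    have key : (PySem.List.pyRange 0 (PySem.List.len (h :: t)) 1).foldl
        (fun (st : Int × Int) i =>
          if PySem.List.pyGetD (h :: t) i 0 > st.1 then (PySem.List.pyGetD (h :: t) i 0, i) else st)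
        (h, 0)
        = (PySem.List.enumerate (h :: t) 0).foldl
            (fun (st : Int × Int) p => if p.2 > st.1 then (p.2, p.1) else st) (h, 0) := by
      rw [PySem.List.enumerate_eq_map_pyRange (h :: t) (0 : Int), List.foldl_map]
    rw [key, PySem.List.enumerate_cons, List.foldl_cons]
    simp only [ite_self]
    rw [pvScan_spec]
    simp only
    have hle : h ≤ t.foldl max h := (PySem.List.le_foldl_max t h).1
    by_cases hlt : h < t.foldl max h
    · have hne : h ≠ t.foldl max h := by omega
      have hmem : t.foldl max h ∈ t := by
        rcases PySem.List.foldl_max_mem t h with he | hm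
        · omega
        · exact hm
      rw [if_pos hlt, PySem.List.index?_cons_of_ne _ hne,
          PySem.List.index?_eq_idxOf?, pvIdxOf?_of_mem hmem]
      simp only [Option.map_some, Option.getD_some]
      push_cast; ring
    · have heq : t.foldl max h = h := by omega
      rw [if_neg hlt, heq, PySem.List.index?_cons_self]
      simp
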